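-- pv_equiv track=rewrite | github.com/Lkinneer/misc_projects | vigenere_cipher_decrypter.py | get_cypher_groups
-- ===== SOURCE A (Python) =====
-- def get_cypher_groups(cypher_text, key_length):
--   sumstrings = {}
--   for i in range(0,key_length):
--     sumstrings[i] = ''
--     for j in range(0,len(cypher_text)):
--       if j%key_length == i:
--         sumstrings[i] = sumstrings[i]+cypher_text[j]
--   return sumstrings
-- ===== SOURCE B (Python) =====
-- def get_cypher_groups(cypher_text, key_length):
--     if key_length <= 0:
--         return {}
--     groups = [''] * key_length
--     for j, c in enumerate(cypher_text):
--         groups[j % key_length] += c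
--     return {i: g for i, g in enumerate(groups)}
-- ===== Notes on version B (the rewrite author's own statement) =====
-- stated objective: faster
-- what changed: Replaced the key_length full scans of the text (one per group) by a single pass that appends each character to group j % key_length, collecting results positionally in a list instead of a dict built key by key.
import Mathlib
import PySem

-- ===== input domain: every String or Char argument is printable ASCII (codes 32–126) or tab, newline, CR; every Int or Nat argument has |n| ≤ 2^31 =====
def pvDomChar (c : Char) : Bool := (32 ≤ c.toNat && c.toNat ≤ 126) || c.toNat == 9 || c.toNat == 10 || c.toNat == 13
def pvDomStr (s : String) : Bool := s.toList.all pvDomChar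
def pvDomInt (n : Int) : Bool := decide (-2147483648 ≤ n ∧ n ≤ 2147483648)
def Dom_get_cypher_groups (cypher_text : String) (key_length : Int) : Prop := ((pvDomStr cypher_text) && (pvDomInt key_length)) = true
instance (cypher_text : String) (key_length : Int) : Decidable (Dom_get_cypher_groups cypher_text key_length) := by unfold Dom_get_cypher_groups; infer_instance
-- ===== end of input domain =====

-- B replaces A's key_length full scans of the text by one single pass appending each
-- character to group j % key_length (a different, single-pass algorithm).

-- ===== PORT A =====
-- Strings are handled on the List Char side (PySem convention); the dict of group
-- strings is a PySem.Dict Int (List Char), converted to List (Int × String) at the end.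
def get_cypher_groups (cypher_text : String) (key_length : Int) : List (Int × String) :=
  let cs := cypher_text.toList
  let sumstrings : PySem.Dict Int (List Char) :=
    (PySem.List.pyRange 0 key_length 1).foldl (fun d i =>
      (PySem.List.pyRange 0 (cs.length : Int) 1).foldl (fun d2 j =>
        if PySem.Int.mod j key_length = i then
          d2.insert i (d2.getD i [] ++ [PySem.List.pyGetD cs j ' '])
        else d2) (d.insert i [])) PySem.Dict.empty
  sumstrings.items.map (fun p => (p.1, String.ofList p.2))

-- ===== PORT B =====
def get_cypher_groups_alt (cypher_text : String) (key_length : Int) : List (Int × String) :=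
  if key_length ≤ 0 then []
  else
    let groups : List (List Char) :=
      (PySem.List.enumerate cypher_text.toList 0).foldl
        (fun gs p =>
          PySem.List.pySetD gs (PySem.Int.mod p.1 key_length)
            (PySem.List.pyGetD gs (PySem.Int.mod p.1 key_length) [] ++ [p.2]))
        (List.replicate key_length.toNat [])
    (PySem.List.enumerate groups 0).map (fun p => (p.1, String.ofList p.2))

-- ===== PRECONDITION & SPEC =====
def Spec_get_cypher_groups (cypher_text : String) (key_length : Int) (out : List (Int × String)) : Prop := out = get_cypher_groups_alt cypher_text key_length
instance (cypher_text : String) (key_length : Int) (out : List (Int × String)) : Decidable (Spec_get_cypher_groups cypher_text key_length out) := by unfold Spec_get_cypher_groups; infer_instance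

-- ===== CLAIM (what is proved, stated in full; the proofs are below) =====
def Claim_equal_get_cypher_groups : Prop := ∀ (cypher_text : String) (key_length : Int), Dom_get_cypher_groups cypher_text key_length → Spec_get_cypher_groups cypher_text key_length (get_cypher_groups cypher_text key_length)

-- ===== LEMMAS AND PROOFS =====

-- canonical group content: characters of cs at positions t with (s + t) % k = i
def pvGrp (cs : List Char) (k s i : Int) : List Char :=
  ((List.range cs.length).filter
      (fun t : Nat => decide (PySem.Int.mod (s + (t : Int)) k = i))).map
    (fun t => cs.getD t ' ')

lemma pvGrp_nil (k s i : Int) : pvGrp [] k s i = [] := rfl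

lemma pvGrp_cons (c : Char) (cs : List Char) (k s i : Int) :
    pvGrp (c :: cs) k s i =
      (if PySem.Int.mod s k = i then [c] else []) ++ pvGrp cs k (s + 1) i := by
  unfold pvGrp
  simp only [List.length_cons, List.range_succ_eq_map, List.filter_cons, List.filter_map,
    Nat.cast_zero, add_zero, decide_eq_true_eq]
  have h1 : ∀ t ∈ List.range cs.length,
      ((fun t : Nat => decide (PySem.Int.mod (s + (t : Int)) k = i)) ∘ Nat.succ) t
        = (fun t : Nat => decide (PySem.Int.mod ((s + 1) + (t : Int)) k = i)) t := by
    intro t _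
    simp only [Function.comp_apply]
    have hst : s + ((Nat.succ t : Nat) : Int) = (s + 1) + (t : Int) := by push_cast; ring
    rw [hst]
  rw [List.filter_congr h1]
  split_ifs with h
  · simp [List.map_map]
  · simp [List.map_map]

-- A's inner loop: starting from d with key i freshly set to v, it appends to key i
-- exactly the selected characters, leaving the rest of d alone.
lemma a_inner (cs : List Char) (k i : Int) (js : List Int)
    (d : PySem.Dict Int (List Char)) (v : List Char) :
    js.foldl (fun d2 j =>
        if PySem.Int.mod j k = i then
          d2.insert i (d2.getD i [] ++ [PySem.List.pyGetD cs j ' '])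
        else d2) (d.insert i v)
      = d.insert i (v ++ (js.filter (fun j => decide (PySem.Int.mod j k = i))).map
          (fun j => PySem.List.pyGetD cs j ' ')) := by
  induction js generalizing d v with
  | nil => simp
  | cons j js ih =>
    simp only [List.foldl_cons, List.filter_cons]
    by_cases h : PySem.Int.mod j k = i
    · rw [if_pos h]
      simp only [h, decide_true]
      rw [PySem.Dict.getD_insert_self, PySem.Dict.insert_insert_self, ih]
      simp [List.append_assoc]
    · rw [if_neg h]
      simp only [h, decide_false]
      exact ih d v

-- A's selection over range(0, len cs) is the canonical group content.
lemma a_sel (cs : List Char) (k i : Int) :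
    ((PySem.List.pyRange 0 (cs.length : Int) 1).filter
        (fun j => decide (PySem.Int.mod j k = i))).map (fun j => PySem.List.pyGetD cs j ' ')
      = pvGrp cs k 0 i := by
  rw [PySem.List.pyRange_zero_nat, List.filter_map, List.map_map]
  unfold pvGrp
  have h1 : ∀ t ∈ List.range cs.length,
      ((fun j : Int => decide (PySem.Int.mod j k = i)) ∘ fun t : Nat => (t : Int)) t
        = (fun t : Nat => decide (PySem.Int.mod (0 + (t : Int)) k = i)) t := by
    intro t _; simp
  rw [List.filter_congr h1]
  apply List.map_congr_left
  intro t ht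
  simp only [Function.comp_apply, PySem.List.pyGetD_natCast]

-- a set/getD exchange used by B's invariant
lemma pvGetD_set {α : Type} (l : List α) (i j : Nat) (a d : α) (h : i < l.length) :
    (l.set i a).getD j d = if i = j then a else l.getD j d := by
  rcases eq_or_ne i j with rfl | hne
  · simp [List.getD_eq_getElem?_getD, h]
  · simp [List.getD_eq_getElem?_getD, List.getElem?_set_ne hne, hne]

-- B's fold invariant.
lemma b_inv (k : Int) (hk : 0 < k) (cs : List Char) :
    ∀ (s : Int) (gs : List (List Char)), 0 ≤ s → gs.length = k.toNat →
    (PySem.List.enumerate cs s).foldl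
        (fun gs p =>
          PySem.List.pySetD gs (PySem.Int.mod p.1 k)
            (PySem.List.pyGetD gs (PySem.Int.mod p.1 k) [] ++ [p.2])) gs
      = (List.range k.toNat).map (fun t => gs.getD t [] ++ pvGrp cs k s (t : Int)) := by
  induction cs with
  | nil =>
    intro s gs _ hlen
    simp only [PySem.List.enumerate_nil, List.foldl_nil, pvGrp_nil, List.append_nil]
    apply List.ext_getElem
    · simp [hlen]
    · intro n h1 h2
      simp only [List.getElem_map, List.getElem_range]
      rw [List.getD_eq_getElem _ _ (by omega)]
  | cons c cs ih =>
    intro s gs hs hlen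
    rw [PySem.List.enumerate_cons, List.foldl_cons]
    have hm0 : (0:Int) ≤ PySem.Int.mod s k := PySem.Int.mod_nonneg s hk
    have hmk : PySem.Int.mod s k < k := PySem.Int.mod_lt s hk
    have hmcast : PySem.Int.mod s k = (((PySem.Int.mod s k).toNat : Nat) : Int) := by omega
    have hmlen : (PySem.Int.mod s k).toNat < gs.length := by omega
    rw [hmcast, PySem.List.pySetD_natCast, PySem.List.pyGetD_natCast]
    rw [ih (s + 1) _ (by omega) (by simp [hlen])]
    apply List.map_congr_left
    intro t ht
    rw [List.mem_range] at ht
    rw [pvGrp_cons, pvGetD_set _ _ _ _ _ hmlen]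
    by_cases h : PySem.Int.mod s k = (t : Int)
    · rw [if_pos (by omega), if_pos h]
      have hidx : (PySem.Int.mod s k).toNat = t := by omega
      rw [hidx]
      simp [List.append_assoc]
    · rw [if_neg (by omega), if_neg h]
      simp

-- enumerate written as a map over range (used to read off B's final comprehension)
lemma pvEnumerate_eq {α : Type} (d : α) (xs : List α) :
    ∀ s : Int, PySem.List.enumerate xs s
      = (List.range xs.length).map (fun t : Nat => (s + (t : Int), xs.getD t d)) := by
  induction xs with
  | nil => intro s; simp [PySem.List.enumerate_nil]
  | cons x xs ih =>
    intro s
    rw [PySem.List.enumerate_cons, ih (s + 1)]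
    simp only [List.length_cons, List.range_succ_eq_map, List.map_cons, Nat.cast_zero,
      add_zero, List.getD_cons_zero, List.map_map]
    apply congrArg
    apply List.map_congr_left
    intro t _
    simp only [Function.comp_apply, List.getD_cons_succ, Prod.mk.injEq, and_true]
    push_cast
    ring

lemma enum_map_range {α : Type} (f : Nat → α) (K : Nat) :
    PySem.List.enumerate ((List.range K).map f) 0
      = (List.range K).map (fun t : Nat => ((t : Int), f t)) := by
  rw [pvEnumerate_eq (f 0)]
  simp only [List.length_map, List.length_range]
  apply List.map_congr_left
  intro t ht
  rw [List.mem_range] at ht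
  rw [PySem.List.getD_map_range _ _ _ _ ht]
  simp

-- ===== VERDICT (by name: the statement is the Claim_ definition above) =====
theorem get_cypher_groups_spec : Claim_equal_get_cypher_groups := by
  intro t k _
  unfold Spec_get_cypher_groups get_cypher_groups get_cypher_groups_alt
  by_cases hk : k ≤ 0
  · rw [if_pos hk]
    simp [PySem.List.pyRange_one_eq_nil hk, PySem.Dict.empty]
  · rw [if_neg hk]
    rw [not_le] at hk
    simp only []
    have hA : ((PySem.List.pyRange 0 k 1).foldl (fun d i =>
        (PySem.List.pyRange 0 (t.toList.length : Int) 1).foldl (fun d2 j =>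
          if PySem.Int.mod j k = i then
            d2.insert i (d2.getD i [] ++ [PySem.List.pyGetD t.toList j ' '])
          else d2) (d.insert i [])) PySem.Dict.empty).items
        = (PySem.List.pyRange 0 k 1).map (fun i => (i, pvGrp t.toList k 0 i)) := by
      rw [PySem.List.foldl_congr_mem _ _
        (fun d i => d.insert i (pvGrp t.toList k 0 i)) _
        (by
          intro acc i _
          rw [a_inner, a_sel]
          simp)]
      rw [PySem.Dict.items_foldl_insert_fresh (PySem.List.pyRange 0 k 1) (fun i => i)
        (fun i => pvGrp t.toList k 0 i) PySem.Dict.empty (by intro a _; simp)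
        (by simpa using PySem.List.nodup_pyRange_one 0 k)]
      simp [PySem.Dict.empty]
    rw [hA]
    rw [b_inv k hk t.toList 0 _ le_rfl (by simp)]
    have hgrp : ∀ x ∈ List.range k.toNat,
        (fun t' : Nat => (List.replicate k.toNat ([] : List Char)).getD t' []
            ++ pvGrp t.toList k 0 (t' : Int)) x
          = (fun t' : Nat => pvGrp t.toList k 0 (t' : Int)) x := by
      intro x hx
      rw [List.mem_range] at hx
      simp only []
      rw [List.getD_eq_getElem _ _ (by simpa using hx)]
      simp
    rw [List.map_congr_left hgrp, enum_map_range, PySem.List.pyRange_zero]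
    simp [List.map_map]
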